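-- pv_equiv track=rewrite | github.com/Datachar/calculator | str_to_list.py | gluing_numbers
-- ===== SOURCE A (Python) =====
-- def gluing_numbers(expression_l):
--     i = 0
--     number_l = list(range(10))
--     op = False
--     while i != len(expression_l):
--         if expression_l[i] in str(number_l) or op == True:
--             if i + 1 == len(expression_l):
--                 break
--             elif expression_l[i + 1] in str(number_l):
--                 expression_l[i] = expression_l[i] + expression_l[i + 1]
--                 expression_l.pop(i + 1)
--                 op = True
--             else:
--                 i += 1
--                 op = False
--         else:
--             i += 1
--             op = False
--     return expression_l
-- ===== SOURCE B (Python) =====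
-- def gluing_numbers(expression_l):
--     # Single pass: concatenate each maximal run of tokens that are substrings
--     # of str(list(range(10))) into one token. Mutates expression_l in place
--     # (like A) and returns it.
--     digits = str(list(range(10)))
--     out = []
--     run = None
--     for tok in expression_l:
--         if tok in digits:
--             run = tok if run is None else run + tok
--         else:
--             if run is not None:
--                 out.append(run)
--                 run = None
--             out.append(tok)
--     if run is not None:
--         out.append(run)
--     expression_l[:] = out
--     return expression_l
-- ===== Notes on version B (the rewrite author's own statement) =====
-- stated objective: faster
-- what changed: A repeatedly mutates the list in place, concatenating into position i and popping i+1 (each pop shifts the tail, O(n^2)); B is a single left-to-right pass that accumulates each maximal run of number-like tokens (substrings of str(list(range(10)))) in a 'run' variable and appends finished runs/other tokens to a fresh output list, O(n) list operations.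
import Mathlib
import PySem

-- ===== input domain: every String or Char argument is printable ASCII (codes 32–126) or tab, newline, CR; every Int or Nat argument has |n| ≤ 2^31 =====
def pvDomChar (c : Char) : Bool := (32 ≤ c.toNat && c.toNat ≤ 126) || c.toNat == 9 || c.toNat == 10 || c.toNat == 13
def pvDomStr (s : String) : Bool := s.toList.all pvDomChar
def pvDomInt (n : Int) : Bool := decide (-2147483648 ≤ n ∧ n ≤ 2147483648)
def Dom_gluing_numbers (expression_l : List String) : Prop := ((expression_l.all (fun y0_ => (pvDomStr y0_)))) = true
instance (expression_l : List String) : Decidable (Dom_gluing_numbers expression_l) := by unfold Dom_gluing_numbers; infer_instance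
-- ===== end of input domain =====

-- B replaces A's in-place while-loop with pops (quadratic) by a single pass that
-- accumulates each maximal run of "number-like" tokens; return value proved equal
-- (both Pythons also mutate the argument list in place; equivalence here is about
-- the returned list only).

-- ===== PORT A =====
-- str(list(range(10))) is exactly this string literal; 'tok in str(number_l)' is a
-- substring test against it.
def pvNumberStr : String := "[0, 1, 2, 3, 4, 5, 6, 7, 8, 9]"
def pvIsNum (tok : String) : Bool := PySem.Str.isIn tok pvNumberStr

-- A's while loop: state = (current list, i, op).  Python checks 'i != len(expression_l)'
-- with i starting at 0 and only ever stepping by 1, so i ≤ len is invariant and the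
-- test is 'len ≤ i' here (a totality guard only; same computation on every input).
-- 'expression_l[i] = … ; expression_l.pop(i + 1)' is set then eraseIdx (i+1 is always
-- in range in that branch).
def glueLoopA (l : List String) (i : Nat) (op : Bool) : List String :=
  if h : l.length ≤ i then l
  else
    if pvIsNum (l.getD i "") || op then
      if h2 : i + 1 = l.length then l
      else if pvIsNum (l.getD (i + 1) "") then
        glueLoopA ((l.set i (l.getD i "" ++ l.getD (i + 1) "")).eraseIdx (i + 1)) i true
      else
        glueLoopA l (i + 1) false
    else
      glueLoopA l (i + 1) false
termination_by l.length - i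
decreasing_by
  · have hx : i + 1 < l.length := by omega
    simp only [List.length_eraseIdx, List.length_set, if_pos hx]
    omega
  · omega
  · omega

def gluing_numbers (expression_l : List String) : List String :=
  glueLoopA expression_l 0 false

-- ===== PORT B =====
-- one fold step of Source B's loop: state = (out, run)
def glueStep (st : List String × Option String) (tok : String) : List String × Option String :=
  if pvIsNum tok then
    (st.1, some (match st.2 with | none => tok | some r => r ++ tok))
  else
    match st.2 with
    | none => (st.1 ++ [tok], none)
    | some r => (st.1 ++ [r, tok], none)

def gluing_numbers_alt (expression_l : List String) : List String :=
  let st := expression_l.foldl glueStep ([], none)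
  match st.2 with
  | none => st.1
  | some r => st.1 ++ [r]

-- ===== PRECONDITION & SPEC =====
def Spec_gluing_numbers (expression_l : List String) (out : List String) : Prop := out = gluing_numbers_alt expression_l
instance (expression_l : List String) (out : List String) : Decidable (Spec_gluing_numbers expression_l out) := by unfold Spec_gluing_numbers; infer_instance

-- ===== CLAIM (what is proved, stated in full; the proofs are below) =====
def Claim_equal_gluing_numbers : Prop := ∀ (expression_l : List String), Dom_gluing_numbers expression_l → Spec_gluing_numbers expression_l (gluing_numbers expression_l)

-- ===== LEMMAS AND PROOFS =====

-- proof-side recursive description of one pass over the remaining tokens with an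
-- optional accumulated run
def glueB : List String → Option String → List String
  | [], none => []
  | [], some r => [r]
  | t :: ts, none => if pvIsNum t then glueB ts (some t) else t :: glueB ts none
  | t :: ts, some r => if pvIsNum t then glueB ts (some (r ++ t)) else r :: t :: glueB ts none

theorem foldl_glueStep_eq_glueB (ts : List String) :
    ∀ (out : List String) (run : Option String),
      (match (ts.foldl glueStep (out, run)).2 with
        | none => (ts.foldl glueStep (out, run)).1
        | some r => (ts.foldl glueStep (out, run)).1 ++ [r]) = out ++ glueB ts run := by
  induction ts with
  | nil => intro out run; cases run <;> simp [glueB]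
  | cons t ts ih =>
    intro out run
    cases run with
    | none =>
      by_cases h : pvIsNum t = true <;>
        simp [glueB, glueStep, h, ih, List.append_assoc]
    | some r =>
      by_cases h : pvIsNum t = true <;>
        simp [glueB, glueStep, h, ih, List.append_assoc]

theorem glueLoopA_eq (l : List String) (i : Nat) (op : Bool)
    (hle : i ≤ l.length) (hop : op = true → i < l.length) :
    glueLoopA l i op =
      l.take i ++ (if op then glueB (l.drop (i + 1)) (some (l.getD i ""))
                   else glueB (l.drop i) none) := by
  induction l, i, op using glueLoopA.induct with
  | case1 l i op h =>
    have hi : i = l.length := le_antisymm hle h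
    subst hi
    rw [glueLoopA, dif_pos (le_refl _)]
    have : op = false := by
      cases op with
      | false => rfl
      | true => exact absurd (hop rfl) (by omega)
    subst this
    simp [glueB]
  | case2 l i op h hc h2 =>
    have hi : i < l.length := lt_of_not_ge h
    rw [glueLoopA, dif_neg h, if_pos hc, dif_pos h2]
    have hdrop1 : l.drop (i + 1) = [] := List.drop_eq_nil_of_le (by omega)
    have hdrop : l.drop i = [l[i]] := by
      rw [List.drop_eq_getElem_cons hi, hdrop1]
    have hget : l.getD i "" = l[i] := List.getD_eq_getElem l "" hi
    cases op with
    | true =>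
      simp only [if_pos, hdrop1, hget, glueB]
      conv_lhs => rw [← List.take_append_drop i l, hdrop]
    | false =>
      have hnum : pvIsNum l[i] = true := by
        have := hc; rw [hget] at this; simpa using this
      simp only [Bool.false_eq_true, hdrop, hget, glueB, hnum, if_pos, hdrop1]
      conv_lhs => rw [← List.take_append_drop i l, hdrop]
      simp
  | case3 l i op h hc h2 h3 ih =>
    have hi : i < l.length := lt_of_not_ge h
    have hi1 : i + 1 < l.length := by omega
    have hgi : l.getD i "" = l[i] := List.getD_eq_getElem l "" hi
    have hgi1 : l.getD (i + 1) "" = l[i + 1] := List.getD_eq_getElem l "" hi1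
    rw [glueLoopA, dif_neg h, if_pos hc, dif_neg h2, if_pos h3]
    set g := l.getD i "" ++ l.getD (i + 1) "" with hg
    set l' := (l.set i g).eraseIdx (i + 1) with hl'
    have hlen : (l.take i).length = i := List.length_take_of_le (by omega)
    have hsplit : l' = l.take i ++ g :: l.drop (i + 2) := by
      rw [hl', List.set_eq_take_append_cons_drop, if_pos hi,
          List.eraseIdx_append_of_length_le (by omega)]
      congr 1
      rw [show i + 1 - (l.take i).length = 1 by omega,
          List.drop_eq_getElem_cons hi1]
      simp [List.eraseIdx]
    have hlen' : l'.length = l.length - 1 := by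
      rw [hl', List.length_eraseIdx_of_lt (by simpa using hi1), List.length_set]
    have htake : l'.take i = l.take i := by
      rw [hsplit, List.take_left' hlen]
    have hdrop' : l'.drop (i + 1) = l.drop (i + 2) := by
      have h0 : List.drop (i + 1) (List.take i l) = [] :=
        List.drop_eq_nil_of_le (by simp [hlen])
      rw [hsplit, List.drop_append, h0, hlen, show i + 1 - i = 1 by omega]
      rfl
    have hgetD' : l'.getD i "" = g := by
      rw [hsplit, List.getD_eq_getElem?_getD,
          List.getElem?_append_right (by omega)]
      simp [hlen]
    rw [ih (by omega) (fun _ => by omega), if_pos rfl, htake, hdrop', hgetD']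
    have hdropi : l.drop i = l[i] :: l[i + 1] :: l.drop (i + 2) := by
      rw [List.drop_eq_getElem_cons hi, List.drop_eq_getElem_cons hi1]
    have hdropi1 : l.drop (i + 1) = l[i + 1] :: l.drop (i + 2) :=
      List.drop_eq_getElem_cons hi1
    have h3' : pvIsNum l[i + 1] = true := by rw [← hgi1]; exact h3
    cases op with
    | true =>
      rw [if_pos rfl, hdropi1]
      simp [glueB, h3', hg, List.getElem?_eq_getElem hi, List.getElem?_eq_getElem hi1]
    | false =>
      have hnum : pvIsNum l[i] = true := by
        have := hc; rw [hgi] at this; simpa using this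
      rw [if_neg (by simp), hdropi]
      simp [glueB, hnum, h3', hg, List.getElem?_eq_getElem hi, List.getElem?_eq_getElem hi1]
  | case4 l i op h hc h2 h3 ih =>
    have hi : i < l.length := lt_of_not_ge h
    have hi1 : i + 1 < l.length := by omega
    have hgi : l.getD i "" = l[i] := List.getD_eq_getElem l "" hi
    rw [glueLoopA, dif_neg h, if_pos hc, dif_neg h2, if_neg (by simpa using h3)]
    rw [ih (by omega) (by simp), if_neg (by simp)]
    have h3' : pvIsNum l[i + 1] = false := by
      have hgi1 : l.getD (i + 1) "" = l[i + 1] := List.getD_eq_getElem l "" hi1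
      rw [← hgi1]; simpa using h3
    have hdropi : l.drop i = l[i] :: l.drop (i + 1) := List.drop_eq_getElem_cons hi
    have hdropi1 : l.drop (i + 1) = l[i + 1] :: l.drop (i + 2) :=
      List.drop_eq_getElem_cons hi1
    have htake1 : l.take (i + 1) = l.take i ++ [l[i]] := by
      rw [List.take_add_one, List.getElem?_eq_getElem hi]; rfl
    cases op with
    | true =>
      rw [if_pos rfl, hdropi1, htake1]
      simp [glueB, h3', List.getElem?_eq_getElem hi]
      rw [htake1, List.append_assoc]
      rfl
    | false =>
      have hnum : pvIsNum l[i] = true := by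
        have := hc; rw [hgi] at this; simpa using this
      rw [if_neg (by simp), hdropi, hdropi1, htake1]
      simp [glueB, hnum, h3']
      rw [htake1, List.append_assoc]
      rfl
  | case5 l i op h hc ih =>
    have hi : i < l.length := lt_of_not_ge h
    have hgi : l.getD i "" = l[i] := List.getD_eq_getElem l "" hi
    have hopf : op = false := by
      cases op with
      | false => rfl
      | true => simp at hc
    subst hopf
    have hnum : pvIsNum l[i] = false := by
      have := hc; rw [hgi] at this; simpa using this
    rw [glueLoopA, dif_neg h, if_neg (by simpa using hc)]
    rw [ih (by omega) (by simp), if_neg (by simp), if_neg (by simp)]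
    have hdropi : l.drop i = l[i] :: l.drop (i + 1) := List.drop_eq_getElem_cons hi
    have htake1 : l.take (i + 1) = l.take i ++ [l[i]] := by
      rw [List.take_add_one, List.getElem?_eq_getElem hi]; rfl
    rw [hdropi, htake1]
    simp [glueB, hnum]
    rw [htake1, List.append_assoc]
    rfl

-- ===== VERDICT (by name: the statement is the Claim_ definition above) =====
theorem gluing_numbers_spec : Claim_equal_gluing_numbers := by
  intro l _
  unfold Spec_gluing_numbers gluing_numbers gluing_numbers_alt
  rw [glueLoopA_eq l 0 false (by omega) (by simp)]
  simpa using (foldl_glueStep_eq_glueB l [] none).symm
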